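-- pv_equiv track=rewrite | github.com/harunidev/AI-Agent | server/services/generator.py | _get_edge_values
-- ===== SOURCE A (Python) =====
-- def _get_edge_values(arg: str) -> list:
--     """Get edge values for a specific argument."""
--     arg_lower = arg.lower()
--     values = []
--
--     # CASE 1: File/directory path parameters
--     if any(x in arg_lower for x in ['file', 'path', 'filepath', 'directory', 'dir', 'folder']):
--         values.extend(["'.'", "'/tmp'", "'nonexistent_path'"])
--
--     # CASE 2: Pattern/search parameters
--     elif any(x in arg_lower for x in ['pattern', 'search', 'query', 'filter', 'keyword']):
--         values.extend(["'.py'", "''"])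
--
--     # CASE 3: Boolean parameters
--     elif any(x in arg_lower for x in ['include', 'skip', 'hidden', 'flag', 'enable']):
--         values.extend(["True", "False"])
--
--     # CASE 4: Numeric parameters
--     elif any(x in arg_lower for x in ['depth', 'max', 'min', 'limit', 'num', 'int', 'count']):
--         values.extend(["-1", "0", "1", "10"])
--
--     # CASE 5: List parameters
--     elif any(x in arg_lower for x in ['list', 'arr', 'items']):
--         values.extend(["[]", "[1]"])
--
--     # FALLBACK
--     else:
--         values.extend(["None", "0", "1", "-1", "''"])
--
--     return values
-- ===== SOURCE B (Python) =====
-- _PRIO = {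
--     'file': 0, 'path': 0, 'filepath': 0, 'directory': 0, 'dir': 0, 'folder': 0,
--     'pattern': 1, 'search': 1, 'query': 1, 'filter': 1, 'keyword': 1,
--     'include': 2, 'skip': 2, 'hidden': 2, 'flag': 2, 'enable': 2,
--     'depth': 3, 'max': 3, 'min': 3, 'limit': 3, 'num': 3, 'int': 3, 'count': 3,
--     'list': 4, 'arr': 4, 'items': 4,
-- }
-- _VALUES = [
--     ["'.'", "'/tmp'", "'nonexistent_path'"],
--     ["'.py'", "''"],
--     ["True", "False"],
--     ["-1", "0", "1", "10"],
--     ["[]", "[1]"],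
--     ["None", "0", "1", "-1", "''"],
-- ]
-- _LENS = (3, 4, 5, 6, 7, 8, 9)  # the distinct keyword lengths
--
--
-- def _get_edge_values(arg: str) -> list:
--     """Single left-to-right scan: hash each short substring into one keyword->priority
--     dict and keep the lowest priority seen; no per-category substring searches."""
--     s = arg.lower()
--     best = len(_VALUES) - 1
--     i = 0
--     while i < len(s):
--         for L in _LENS:
--             g = _PRIO.get(s[i:i + L])
--             if g is not None and g < best:
--                 best = g
--         i += 1
--     return list(_VALUES[best])
-- ===== Notes on version B (the rewrite author's own statement) =====
-- stated objective: alternative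
-- what changed: Instead of running per-category substring searches through an if/elif chain, B makes a single left-to-right scan of the string, hashing each substring of keyword length into one flat keyword-to-priority dict and keeping the lowest priority seen, then indexes a values table with it.
import Mathlib
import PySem

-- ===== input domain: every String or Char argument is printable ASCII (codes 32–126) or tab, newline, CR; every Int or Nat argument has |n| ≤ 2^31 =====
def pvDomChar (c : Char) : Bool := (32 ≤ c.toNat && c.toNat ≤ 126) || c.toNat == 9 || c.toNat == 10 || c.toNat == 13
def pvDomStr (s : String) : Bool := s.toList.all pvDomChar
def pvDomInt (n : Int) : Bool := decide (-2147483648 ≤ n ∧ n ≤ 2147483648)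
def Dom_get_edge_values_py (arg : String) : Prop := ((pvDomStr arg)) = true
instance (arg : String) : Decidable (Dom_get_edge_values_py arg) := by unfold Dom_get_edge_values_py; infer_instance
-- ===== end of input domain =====

-- B replaces A's per-category substring searches by one left-to-right scan that hashes
-- each substring of keyword length into a flat keyword->priority dict, keeping the
-- lowest priority seen (alternative algorithm, same cost class).

-- ===== PORT A =====
def get_edge_values_py (arg : String) : List String :=
  let arg_lower := PySem.Str.lower arg
  let values : List String := []
  if ["file", "path", "filepath", "directory", "dir", "folder"].any
      (fun x => PySem.Str.isIn x arg_lower) then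
    values ++ ["'.'", "'/tmp'", "'nonexistent_path'"]
  else if ["pattern", "search", "query", "filter", "keyword"].any
      (fun x => PySem.Str.isIn x arg_lower) then
    values ++ ["'.py'", "''"]
  else if ["include", "skip", "hidden", "flag", "enable"].any
      (fun x => PySem.Str.isIn x arg_lower) then
    values ++ ["True", "False"]
  else if ["depth", "max", "min", "limit", "num", "int", "count"].any
      (fun x => PySem.Str.isIn x arg_lower) then
    values ++ ["-1", "0", "1", "10"]
  else if ["list", "arr", "items"].any
      (fun x => PySem.Str.isIn x arg_lower) then
    values ++ ["[]", "[1]"]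
  else
    values ++ ["None", "0", "1", "-1", "''"]

-- ===== PORT B =====
-- the flat keyword -> priority dict _PRIO of Source B
def pvTable : List (String × Int) :=
  [("file", 0), ("path", 0), ("filepath", 0), ("directory", 0), ("dir", 0), ("folder", 0),
   ("pattern", 1), ("search", 1), ("query", 1), ("filter", 1), ("keyword", 1),
   ("include", 2), ("skip", 2), ("hidden", 2), ("flag", 2), ("enable", 2),
   ("depth", 3), ("max", 3), ("min", 3), ("limit", 3), ("num", 3), ("int", 3), ("count", 3),
   ("list", 4), ("arr", 4), ("items", 4)]

def pvPrio : PySem.Dict String Int := PySem.Dict.mk pvTable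

-- _VALUES of Source B
def pvValues : List (List String) :=
  [["'.'", "'/tmp'", "'nonexistent_path'"],
   ["'.py'", "''"],
   ["True", "False"],
   ["-1", "0", "1", "10"],
   ["[]", "[1]"],
   ["None", "0", "1", "-1", "''"]]

-- _LENS of Source B: the distinct keyword lengths
def pvLens : List Nat := [3, 4, 5, 6, 7, 8, 9]

-- _PRIO.get(s[i:i+L])
def pvHit (s : String) (i L : Nat) : Option Int :=
  PySem.Dict.get? pvPrio (PySem.Str.slice s (some (i : Int)) (some ((i : Int) + (L : Int))))

-- the body of the while loop: the inner 'for L in _LENS' fold over best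
def pvStep (s : String) (i : Nat) (best : Int) : Int :=
  pvLens.foldl (fun b L =>
    match pvHit s i L with
    | some g => if g < b then g else b
    | none => b) best

-- the 'while i < len(s)' loop
def pvScan (s : String) (i : Nat) (best : Int) : Int :=
  if _h : (i : Int) < PySem.Str.len s then
    pvScan s (i + 1) (pvStep s i best)
  else best
termination_by (PySem.Str.len s).toNat - i
decreasing_by
  have := PySem.Str.len_eq s
  omega

def get_edge_values_py_alt (arg : String) : List String :=
  let s := PySem.Str.lower arg
  let best := pvScan s 0 ((pvValues.length : Int) - 1)
  match PySem.List.pyGet? pvValues best with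
  | some v => v
  | none => []  -- unreachable: pvScan stays within 0..5 (proved below)

-- ===== PRECONDITION & SPEC =====
def Spec_get_edge_values_py (arg : String) (out : List String) : Prop := out = get_edge_values_py_alt arg
instance (arg : String) (out : List String) : Decidable (Spec_get_edge_values_py arg out) := by unfold Spec_get_edge_values_py; infer_instance

-- ===== CLAIM (what is proved, stated in full; the proofs are below) =====
def Claim_equal_get_edge_values_py : Prop := ∀ (arg : String), Dom_get_edge_values_py arg → Spec_get_edge_values_py arg (get_edge_values_py arg)

-- ===== LEMMAS AND PROOFS =====

-- the five keyword groups, in A's elif order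
def pvGroups : List (List String) :=
  [["file", "path", "filepath", "directory", "dir", "folder"],
   ["pattern", "search", "query", "filter", "keyword"],
   ["include", "skip", "hidden", "flag", "enable"],
   ["depth", "max", "min", "limit", "num", "int", "count"],
   ["list", "arr", "items"]]

-- group g has a keyword occurring in s
def pvMatch (s : String) (g : Int) : Bool :=
  (pvGroups.getD g.toNat []).any (fun x => PySem.Str.isIn x s)

-- pvRelax b o is the inline 'g = hit; if g is not None and g < best: best = g' step
def pvRelax (b : Int) (o : Option Int) : Int :=
  match o with
  | some g => if g < b then g else b
  | none => b

theorem pvRelax_le (b : Int) (o : Option Int) : pvRelax b o ≤ b := by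
  cases o with
  | none => exact le_refl b
  | some g =>
    show (if g < b then g else b) ≤ b
    split_ifs <;> omega

theorem pvRelax_le_some (b g : Int) : pvRelax b (some g) ≤ g := by
  show (if g < b then g else b) ≤ g
  split_ifs with h <;> omega

theorem pv_foldl_relax_le {α : Type} (h : α → Option Int) (xs : List α) (b : Int) :
    xs.foldl (fun b x => pvRelax b (h x)) b ≤ b := by
  induction xs generalizing b with
  | nil => exact le_refl b
  | cons x xs ih =>
    simp only [List.foldl_cons]
    exact le_trans (ih _) (pvRelax_le b (h x))

theorem pv_foldl_relax_hit {α : Type} (h : α → Option Int) (xs : List α) (b : Int)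
    {x : α} {g : Int} (hx : x ∈ xs) (hg : h x = some g) :
    xs.foldl (fun b x => pvRelax b (h x)) b ≤ g := by
  induction xs generalizing b with
  | nil => cases hx
  | cons y ys ih =>
    simp only [List.foldl_cons]
    rcases List.mem_cons.mp hx with rfl | hmem
    · refine le_trans (pv_foldl_relax_le h ys _) ?_
      rw [hg]
      exact pvRelax_le_some b g
    · exact ih _ hmem

theorem pv_foldl_relax_cases {α : Type} (h : α → Option Int) (xs : List α) (b : Int) :
    xs.foldl (fun b x => pvRelax b (h x)) b = b ∨
    ∃ x ∈ xs, ∃ g, h x = some g ∧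
      xs.foldl (fun b x => pvRelax b (h x)) b = g := by
  induction xs generalizing b with
  | nil => exact Or.inl rfl
  | cons x xs ih =>
    simp only [List.foldl_cons]
    rcases ih (pvRelax b (h x)) with he | ⟨y, hy, g, hg, he⟩
    · cases hhx : h x with
      | none =>
        rw [hhx] at he
        exact Or.inl (by rw [he]; rfl)
      | some g =>
        rw [hhx] at he
        by_cases hlt : g < b
        · exact Or.inr ⟨x, by simp, g, hhx, by rw [he]; simp [pvRelax, hlt]⟩
        · exact Or.inl (by rw [he]; simp [pvRelax, hlt])
    · exact Or.inr ⟨y, by simp [hy], g, hg, he⟩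

theorem pvStep_eq (s : String) (i : Nat) (b : Int) :
    pvStep s i b = pvLens.foldl (fun b L => pvRelax b (pvHit s i L)) b := rfl

theorem pvStep_le (s : String) (i : Nat) (b : Int) : pvStep s i b ≤ b := by
  rw [pvStep_eq]; exact pv_foldl_relax_le _ _ _

theorem pvStep_hit (s : String) (i : Nat) (b : Int) {L : Nat} {g : Int}
    (hL : L ∈ pvLens) (hg : pvHit s i L = some g) : pvStep s i b ≤ g := by
  rw [pvStep_eq]; exact pv_foldl_relax_hit _ _ _ hL hg

theorem pvStep_cases (s : String) (i : Nat) (b : Int) :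
    pvStep s i b = b ∨ ∃ L ∈ pvLens, ∃ g, pvHit s i L = some g ∧ pvStep s i b = g := by
  rw [pvStep_eq]; exact pv_foldl_relax_cases _ _ _

theorem pvScan_le (s : String) (i : Nat) (b : Int) : pvScan s i b ≤ b := by
  generalize hk : (PySem.Str.len s).toNat - i = k
  induction k generalizing i b with
  | zero =>
    rw [pvScan]
    split
    · rename_i hlt
      have := PySem.Str.len_eq s
      omega
    · exact le_refl b
  | succ k ih =>
    rw [pvScan]
    split
    · exact le_trans (ih _ _ (by have := PySem.Str.len_eq s; omega)) (pvStep_le s i b)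
    · exact le_refl b

theorem pvScan_hit (s : String) (i : Nat) (b : Int) {j L : Nat} {g : Int}
    (hij : i ≤ j) (hj : (j : Int) < PySem.Str.len s) (hL : L ∈ pvLens)
    (hg : pvHit s j L = some g) : pvScan s i b ≤ g := by
  generalize hk : (PySem.Str.len s).toNat - i = k
  induction k generalizing i b with
  | zero =>
    have := PySem.Str.len_eq s
    omega
  | succ k ih =>
    rw [pvScan]
    split
    · by_cases heq : i = j
      · subst heq
        exact le_trans (pvScan_le s _ _) (pvStep_hit s _ _ hL hg)
      · exact ih _ _ (by omega) (by have := PySem.Str.len_eq s; omega)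
    · have := PySem.Str.len_eq s
      omega

theorem pvScan_cases (s : String) (i : Nat) (b : Int) :
    pvScan s i b = b ∨ ∃ j : Nat, i ≤ j ∧ (j : Int) < PySem.Str.len s ∧
      ∃ L ∈ pvLens, ∃ g, pvHit s j L = some g ∧ pvScan s i b = g := by
  generalize hk : (PySem.Str.len s).toNat - i = k
  induction k generalizing i b with
  | zero =>
    rw [pvScan]
    split
    · have := PySem.Str.len_eq s
      omega
    · exact Or.inl rfl
  | succ k ih =>
    rw [pvScan]
    split
    · rename_i hlt
      rcases ih (i + 1) (pvStep s i b) (by have := PySem.Str.len_eq s; omega) with he | ⟨j, hij, hj, L, hL, g, hg, he⟩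
      · rw [he]
        rcases pvStep_cases s i b with he' | ⟨L, hL, g, hg, he'⟩
        · exact Or.inl he'
        · exact Or.inr ⟨i, le_refl i, hlt, L, hL, g, hg, he'⟩
      · exact Or.inr ⟨j, by omega, hj, L, hL, g, hg, he⟩
    · exact Or.inl rfl

-- membership extracted from a literal-dict lookup
theorem pv_get?_mk_mem {ν : Type} (l : List (String × ν)) (u : String) (g : ν)
    (h : (PySem.Dict.mk l).get? u = some g) : (u, g) ∈ l := by
  induction l with
  | nil => simp [PySem.Dict.get?] at h
  | cons p rest ih =>
    rw [show PySem.Dict.mk (p :: rest) = PySem.Dict.mk ((p.1, p.2) :: rest) from rfl,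
      PySem.Dict.get?_mk_cons] at h
    split at h
    · rename_i heq
      have : p.1 = u := by simpa using heq
      cases h
      exact List.mem_cons.mpr (Or.inl (by cases p; simp_all))
    · exact List.mem_cons_of_mem _ (ih h)

-- every slice of s occurs in s
theorem pv_isIn_slice (s : String) (j L : Nat) :
    PySem.Str.isIn (PySem.Str.slice s (some (j : Int)) (some ((j : Int) + (L : Int)))) s = true := by
  rw [PySem.Str.isIn_iff_infix, PySem.Str.toList_slice, PySem.Chars.slice_eq_listSlice,
    PySem.List.slice_natCast_add]
  exact ((List.take_prefix _ _).isInfix).trans ((List.drop_suffix _ _).isInfix)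

-- a keyword occurring in s is some slice of s of its own length
theorem pv_slice_of_isIn (s kw : String) (hin : PySem.Str.isIn kw s = true)
    (hne : kw.toList ≠ []) :
    ∃ j : Nat, (j : Int) < PySem.Str.len s ∧
      PySem.Str.slice s (some (j : Int)) (some ((j : Int) + (kw.toList.length : Int))) = kw := by
  rw [PySem.Str.isIn_eq] at hin
  obtain ⟨j, hpre⟩ := (PySem.Chars.exists_prefix_drop_iff_isIn _ _).mpr hin
  have hjlt : j < s.toList.length := by
    by_contra hge
    rw [List.drop_eq_nil_of_le (by omega)] at hpre
    exact hne (List.prefix_nil.mp hpre)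
  refine ⟨j, by rw [PySem.Str.len_eq]; omega, ?_⟩
  have htake : kw.toList = (s.toList.drop j).take kw.toList.length :=
    List.prefix_iff_eq_take.mp hpre
  have : (PySem.Str.slice s (some (j : Int)) (some ((j : Int) + (kw.toList.length : Int)))).toList = kw.toList := by
    rw [PySem.Str.toList_slice, PySem.Chars.slice_eq_listSlice, PySem.List.slice_natCast_add]
    exact htake.symm
  exact String.toList_inj.mp this

-- a table keyword occurring in s makes its group match
theorem pv_table_match (s u : String) (g : Int) (hm : (u, g) ∈ pvTable)
    (hin : PySem.Str.isIn u s = true) : 0 ≤ g ∧ g < 5 ∧ pvMatch s g = true := by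
  simp only [pvTable, List.mem_cons, List.not_mem_nil, or_false, Prod.mk.injEq] at hm
  rcases hm with ⟨rfl, rfl⟩ | ⟨rfl, rfl⟩ | ⟨rfl, rfl⟩ | ⟨rfl, rfl⟩ | ⟨rfl, rfl⟩ | ⟨rfl, rfl⟩ | ⟨rfl, rfl⟩ | ⟨rfl, rfl⟩ | ⟨rfl, rfl⟩ | ⟨rfl, rfl⟩ | ⟨rfl, rfl⟩ | ⟨rfl, rfl⟩ | ⟨rfl, rfl⟩ | ⟨rfl, rfl⟩ | ⟨rfl, rfl⟩ | ⟨rfl, rfl⟩ | ⟨rfl, rfl⟩ | ⟨rfl, rfl⟩ | ⟨rfl, rfl⟩ | ⟨rfl, rfl⟩ | ⟨rfl, rfl⟩ | ⟨rfl, rfl⟩ | ⟨rfl, rfl⟩ | ⟨rfl, rfl⟩ | ⟨rfl, rfl⟩ | ⟨rfl, rfl⟩ <;>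
    exact ⟨by norm_num, by norm_num, by
      unfold pvMatch pvGroups
      exact List.any_eq_true.mpr ⟨_, by simp, hin⟩⟩

-- every hit of the scan corresponds to a matching group
theorem pvHit_sound (s : String) (j L : Nat) (g : Int) (h : pvHit s j L = some g) :
    0 ≤ g ∧ g < 5 ∧ pvMatch s g = true := by
  unfold pvHit at h
  have hmem := pv_get?_mk_mem pvTable _ g h
  exact pv_table_match s _ g hmem (pv_isIn_slice s j L)

-- a keyword of the dict occurring in s yields a hit of the scan
theorem pv_hit_of_isIn (s kw : String) (g : Int) (hin : PySem.Str.isIn kw s = true)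
    (hne : kw.toList ≠ []) (hlen : kw.toList.length ∈ pvLens)
    (hget : PySem.Dict.get? pvPrio kw = some g) :
    ∃ j L : Nat, (j : Int) < PySem.Str.len s ∧ pvHit s j L = some g ∧ L ∈ pvLens := by
  obtain ⟨j, hj, hsl⟩ := pv_slice_of_isIn s kw hin hne
  exact ⟨j, kw.toList.length, hj, by unfold pvHit; rw [hsl]; exact hget, hlen⟩

-- a matching group yields a hit of the scan
theorem pv_match_hit (s : String) (g : Int)
    (hg : g = 0 ∨ g = 1 ∨ g = 2 ∨ g = 3 ∨ g = 4) (h : pvMatch s g = true) :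
    ∃ j L : Nat, (j : Int) < PySem.Str.len s ∧ pvHit s j L = some g ∧ L ∈ pvLens := by
  have hex : ∃ u, (u, g) ∈ pvTable ∧ PySem.Str.isIn u s = true := by
    rcases hg with rfl | rfl | rfl | rfl | rfl <;>
      · unfold pvMatch at h
        obtain ⟨u, hu, hin⟩ := List.any_eq_true.mp h
        refine ⟨u, ?_, hin⟩
        clear hin
        revert u
        decide
  obtain ⟨u, hmem, hin⟩ := hex
  simp only [pvTable, List.mem_cons, List.not_mem_nil, or_false, Prod.mk.injEq] at hmem
  rcases hmem with ⟨rfl, rfl⟩ | ⟨rfl, rfl⟩ | ⟨rfl, rfl⟩ | ⟨rfl, rfl⟩ | ⟨rfl, rfl⟩ | ⟨rfl, rfl⟩ | ⟨rfl, rfl⟩ | ⟨rfl, rfl⟩ | ⟨rfl, rfl⟩ | ⟨rfl, rfl⟩ | ⟨rfl, rfl⟩ | ⟨rfl, rfl⟩ | ⟨rfl, rfl⟩ | ⟨rfl, rfl⟩ | ⟨rfl, rfl⟩ | ⟨rfl, rfl⟩ | ⟨rfl, rfl⟩ | ⟨rfl, rfl⟩ | ⟨rfl, rfl⟩ | ⟨rfl,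 rfl⟩ | ⟨rfl, rfl⟩ | ⟨rfl, rfl⟩ | ⟨rfl, rfl⟩ | ⟨rfl, rfl⟩ | ⟨rfl, rfl⟩ | ⟨rfl, rfl⟩ <;>
    exact pv_hit_of_isIn s _ _ hin (by decide) (by decide) (by decide)

-- the main equivalence
theorem pv_main (arg : String) : get_edge_values_py arg = get_edge_values_py_alt arg := by
  have h55 : ((pvValues.length : Int) - 1) = 5 := by decide
  rw [show get_edge_values_py_alt arg =
      (match PySem.List.pyGet? pvValues
          (pvScan (PySem.Str.lower arg) 0 ((pvValues.length : Int) - 1)) with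
        | some v => v
        | none => []) from rfl, h55]
  set s := PySem.Str.lower arg with hs
  set m := pvScan s 0 5 with hm
  have hle5 : m ≤ 5 := pvScan_le s 0 5
  have hcases := pvScan_cases s 0 5
  rw [show get_edge_values_py arg =
      (if pvMatch s 0 = true then ["'.'", "'/tmp'", "'nonexistent_path'"]
       else if pvMatch s 1 = true then ["'.py'", "''"]
       else if pvMatch s 2 = true then ["True", "False"]
       else if pvMatch s 3 = true then ["-1", "0", "1", "10"]
       else if pvMatch s 4 = true then ["[]", "[1]"]
       else ["None", "0", "1", "-1", "''"]) from rfl]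
  by_cases h0 : pvMatch s 0 = true
  · obtain ⟨j, L, hj, hhit, hL⟩ := pv_match_hit s 0 (by norm_num) h0
    have hub : m ≤ 0 := pvScan_hit s 0 5 (Nat.zero_le j) hj hL hhit
    have hlb : 0 ≤ m := by
      rcases hcases with he | ⟨j', _, _, L', hL', g', hg', he⟩
      · omega
      · have := pvHit_sound s j' L' g' hg'
        omega
    rw [if_pos h0, show m = 0 from le_antisymm hub hlb]
    rfl
  · by_cases h1 : pvMatch s 1 = true
    · obtain ⟨j, L, hj, hhit, hL⟩ := pv_match_hit s 1 (by norm_num) h1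
      have hub : m ≤ 1 := pvScan_hit s 0 5 (Nat.zero_le j) hj hL hhit
      have hmx : m = 1 := by
        rcases hcases with he | ⟨j', _, _, L', hL', g', hg', he⟩
        · omega
        · obtain ⟨hg0, hg5, hgm⟩ := pvHit_sound s j' L' g' hg'
          have hne : g' ≠ 0 := fun hE => h0 (hE ▸ hgm)
          omega
      rw [if_neg h0, if_pos h1, hmx]
      rfl
    · by_cases h2 : pvMatch s 2 = true
      · obtain ⟨j, L, hj, hhit, hL⟩ := pv_match_hit s 2 (by norm_num) h2
        have hub : m ≤ 2 := pvScan_hit s 0 5 (Nat.zero_le j) hj hL hhit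
        have hmx : m = 2 := by
          rcases hcases with he | ⟨j', _, _, L', hL', g', hg', he⟩
          · omega
          · obtain ⟨hg0, hg5, hgm⟩ := pvHit_sound s j' L' g' hg'
            have hne0 : g' ≠ 0 := fun hE => h0 (hE ▸ hgm)
            have hne1 : g' ≠ 1 := fun hE => h1 (hE ▸ hgm)
            omega
        rw [if_neg h0, if_neg h1, if_pos h2, hmx]
        rfl
      · by_cases h3 : pvMatch s 3 = true
        · obtain ⟨j, L, hj, hhit, hL⟩ := pv_match_hit s 3 (by norm_num) h3
          have hub : m ≤ 3 := pvScan_hit s 0 5 (Nat.zero_le j) hj hL hhit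
          have hmx : m = 3 := by
            rcases hcases with he | ⟨j', _, _, L', hL', g', hg', he⟩
            · omega
            · obtain ⟨hg0, hg5, hgm⟩ := pvHit_sound s j' L' g' hg'
              have hne0 : g' ≠ 0 := fun hE => h0 (hE ▸ hgm)
              have hne1 : g' ≠ 1 := fun hE => h1 (hE ▸ hgm)
              have hne2 : g' ≠ 2 := fun hE => h2 (hE ▸ hgm)
              omega
          rw [if_neg h0, if_neg h1, if_neg h2, if_pos h3, hmx]
          rfl
        · by_cases h4 : pvMatch s 4 = true
          · obtain ⟨j, L, hj, hhit, hL⟩ := pv_match_hit s 4 (by norm_num) h4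
            have hub : m ≤ 4 := pvScan_hit s 0 5 (Nat.zero_le j) hj hL hhit
            have hmx : m = 4 := by
              rcases hcases with he | ⟨j', _, _, L', hL', g', hg', he⟩
              · omega
              · obtain ⟨hg0, hg5, hgm⟩ := pvHit_sound s j' L' g' hg'
                have hne0 : g' ≠ 0 := fun hE => h0 (hE ▸ hgm)
                have hne1 : g' ≠ 1 := fun hE => h1 (hE ▸ hgm)
                have hne2 : g' ≠ 2 := fun hE => h2 (hE ▸ hgm)
                have hne3 : g' ≠ 3 := fun hE => h3 (hE ▸ hgm)
                omega
            rw [if_neg h0, if_neg h1, if_neg h2, if_neg h3, if_pos h4, hmx]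
            rfl
          · have hmx : m = 5 := by
              rcases hcases with he | ⟨j', _, _, L', hL', g', hg', he⟩
              · exact he
              · obtain ⟨hg0, hg5, hgm⟩ := pvHit_sound s j' L' g' hg'
                have hor : g' = 0 ∨ g' = 1 ∨ g' = 2 ∨ g' = 3 ∨ g' = 4 := by omega
                rcases hor with rfl | rfl | rfl | rfl | rfl
                · exact absurd hgm h0
                · exact absurd hgm h1
                · exact absurd hgm h2
                · exact absurd hgm h3
                · exact absurd hgm h4
            rw [if_neg h0, if_neg h1, if_neg h2, if_neg h3, if_neg h4, hmx]
            rfl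

-- ===== VERDICT (by name: the statement is the Claim_ definition above) =====
theorem get_edge_values_py_spec : Claim_equal_get_edge_values_py := by
  intro arg _
  unfold Spec_get_edge_values_py
  exact pv_main arg
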